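-- pv_equiv track=rewrite | github.com/linguistic76/skuel | app/scripts/detect_library_changes.py | build_package_to_skills_map
-- ===== SOURCE A (Python) =====
-- from typing import Any
--
-- def build_package_to_skills_map(skills_data: dict[str, Any]) -> dict[str, list[str]]:
--     """
--     Build mapping of PyPI package name to skills that use it.
--
--     Returns: {package_name: [skill_names]}
--     """
--     package_map: dict[str, list[str]] = {}
--
--     for skill in skills_data["skills"]:
--         name = skill["name"]
--         library_package = skill.get("library_package")
--
--         if library_package:  # Skip null values
--             if library_package not in package_map:
--                 package_map[library_package] = []
--             package_map[library_package].append(name)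
--
--     return package_map
-- ===== SOURCE B (Python) =====
-- def build_package_to_skills_map(skills_data):
--     """Gather-then-group: collect (package, name) pairs once, then build each
--     package's name list by a scan, packages in first-seen order."""
--     pairs = [(s["library_package"], s["name"])
--              for s in skills_data["skills"] if s.get("library_package")]
--     packages = list(dict.fromkeys(p for p, _ in pairs))
--     return {p: [n for q, n in pairs if q == p] for p in packages}
-- ===== Notes on version B (the rewrite author's own statement) =====
-- stated objective: alternative
-- what changed: Replaces A's incremental dict-building loop (insert-empty-then-append per skill) by gather-then-group: collect the (package, name) pairs in one comprehension, dedupe the packages in first-seen order, then build each package's name list by a filter scan over the pairs.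
import Mathlib
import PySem

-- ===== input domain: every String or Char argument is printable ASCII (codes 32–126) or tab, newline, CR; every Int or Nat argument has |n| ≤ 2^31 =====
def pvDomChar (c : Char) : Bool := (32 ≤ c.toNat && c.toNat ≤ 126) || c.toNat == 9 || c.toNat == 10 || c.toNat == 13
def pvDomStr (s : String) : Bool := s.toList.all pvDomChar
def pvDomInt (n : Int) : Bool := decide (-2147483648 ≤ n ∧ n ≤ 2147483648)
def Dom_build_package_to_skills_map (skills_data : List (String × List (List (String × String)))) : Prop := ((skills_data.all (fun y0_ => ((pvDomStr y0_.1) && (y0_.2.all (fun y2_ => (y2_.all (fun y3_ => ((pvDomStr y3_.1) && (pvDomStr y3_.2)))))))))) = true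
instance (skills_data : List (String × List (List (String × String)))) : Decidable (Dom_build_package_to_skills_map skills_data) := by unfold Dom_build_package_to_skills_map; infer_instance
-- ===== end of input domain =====

-- B replaces A's incremental dict-building loop by gather-then-group (collect pairs, dedupe packages, filter per package); return-value equivalence only.

-- ===== PORT A =====
def build_package_to_skills_map (skills_data : List (String × List (List (String × String)))) : List (String × List String) :=
  let skills := (PySem.Dict.ofList skills_data).getD "skills" []
  let pm := skills.foldl (fun pm skill =>
    let sk := PySem.Dict.ofList skill
    let name := sk.getD "name" ""          -- skill["name"]; Pre_ excludes the KeyError case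
    match sk.get? "library_package" with   -- skill.get("library_package")
    | some lp =>
        if lp ≠ "" then                    -- truthy: non-empty string
          let pm := if pm.contains lp then pm else pm.insert lp []
          pm.modify lp [] (fun l => l ++ [name])
        else pm
    | none => pm) PySem.Dict.empty
  pm.items

-- ===== PORT B =====
def build_package_to_skills_map_alt (skills_data : List (String × List (List (String × String)))) : List (String × List String) :=
  let skills := (PySem.Dict.ofList skills_data).getD "skills" []
  let pairs := skills.filterMap (fun s =>
    let d := PySem.Dict.ofList s
    match d.get? "library_package" with
    | some p => if p ≠ "" then some (p, d.getD "name" "") else none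
    | none => none)
  let packages := PySem.List.dedup (pairs.map Prod.fst)   -- list(dict.fromkeys(…))
  packages.map (fun p => (p, (pairs.filter (fun q => q.1 == p)).map (·.2)))

-- ===== PRECONDITION & SPEC =====
-- Pre_ excludes exactly the inputs on which Python A raises KeyError: a missing "skills" key, or a skill dict without a "name" key.
def Pre_build_package_to_skills_map (skills_data : List (String × List (List (String × String)))) : Prop :=
  (PySem.Dict.ofList skills_data).contains "skills" = true ∧
  ∀ s ∈ (PySem.Dict.ofList skills_data).getD "skills" [], (PySem.Dict.ofList s).contains "name" = true
instance (skills_data : List (String × List (List (String × String)))) : Decidable (Pre_build_package_to_skills_map skills_data) := by unfold Pre_build_package_to_skills_map; infer_instance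

def pvWitness_build_package_to_skills_map : (List (String × List (List (String × String)))) :=
  [("skills", [[("name", "a"), ("library_package", "x")], [("name", "b")]])]

def Spec_build_package_to_skills_map (skills_data : List (String × List (List (String × String)))) (out : List (String × List String)) : Prop := out = build_package_to_skills_map_alt skills_data
instance (skills_data : List (String × List (List (String × String)))) (out : List (String × List String)) : Decidable (Spec_build_package_to_skills_map skills_data out) := by unfold Spec_build_package_to_skills_map; infer_instance

-- ===== CLAIM (what is proved, stated in full; the proofs are below) =====
def Claim_equal_build_package_to_skills_map : Prop := ∀ (skills_data : List (String × List (List (String × String)))), Dom_build_package_to_skills_map skills_data → Pre_build_package_to_skills_map skills_data → Spec_build_package_to_skills_map skills_data (build_package_to_skills_map skills_data)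

-- ===== LEMMAS AND PROOFS =====

-- the per-skill extraction both ports perform
def pvExtract (s : List (String × String)) : Option (String × String) :=
  let d := PySem.Dict.ofList s
  match d.get? "library_package" with
  | some p => if p ≠ "" then some (p, d.getD "name" "") else none
  | none => none

lemma foldl_pvExtract :
    ∀ (l : List (List (String × String))) (init : PySem.Dict String (List String)),
      l.foldl (fun pm skill =>
          match pvExtract skill with
          | some y => pm.modify y.1 [] (fun ls => ls ++ [y.2])
          | none => pm) init
        = (l.filterMap pvExtract).foldl
            (fun pm y => pm.modify y.1 [] (fun ls => ls ++ [y.2])) init := by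
  intro l
  induction l with
  | nil => intro init; rfl
  | cons h t ih =>
      intro init
      simp only [List.foldl_cons, List.filterMap_cons]
      cases hx : pvExtract h with
      | none => exact ih init
      | some y => simp [List.foldl_cons, ih]

-- insert-an-empty-list-then-append equals a single modify
lemma insert_modify_eq_modify (d : PySem.Dict String (List String)) (k : String) (n : String) :
    PySem.Dict.modify (if d.contains k then d else d.insert k []) k [] (fun l => l ++ [n])
      = d.modify k [] (fun l => l ++ [n]) := by
  by_cases h : d.contains k = true
  · rw [if_pos h]
  · have h' : d.contains k = false := by
      cases hc : d.contains k with
      | true => exact absurd hc h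
      | false => rfl
    rw [if_neg (by simp [h'])]
    apply PySem.Dict.ext
    have hk : ∀ p ∈ d.items, p.1 ≠ k := by
      intro p hp hpk
      have : k ∈ d.keys := by
        simp only [PySem.Dict.keys]
        exact hpk ▸ List.mem_map_of_mem hp
      rw [← PySem.Dict.contains_iff_mem_keys] at this
      rw [h'] at this; exact Bool.false_ne_true this
    -- modify = insert of the updated value; unfold both sides to items
    have hins : (d.insert k ([] : List String)).items = d.items ++ [(k, [])] :=
      PySem.Dict.items_insert_of_not_contains d [] h'
    have hgl : (d.insert k ([] : List String)).getD k [] = [] :=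
      PySem.Dict.getD_insert_self d k [] []
    have hgr : d.getD k [] = [] := PySem.Dict.getD_of_not_contains d [] h'
    have hcl : (d.insert k ([] : List String)).contains k = true :=
      PySem.Dict.contains_insert_self d k []
    simp only [PySem.Dict.modify, hgl, hgr]
    rw [PySem.Dict.items_insert_of_contains (d.insert k []) (([] : List String) ++ [n]) hcl,
        PySem.Dict.items_insert_of_not_contains d (([] : List String) ++ [n]) h', hins]
    have hid : ∀ p ∈ d.items, (if (p.1 == k) = true then (k, ([] : List String) ++ [n]) else p) = p := by
      intro p hp
      rw [if_neg]
      simp [beq_eq_false_iff_ne.mpr (hk p hp)]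
    rw [List.map_append, List.map_congr_left hid]
    simp

-- a dict with nodup keys is exactly its keys paired with their getD values
lemma mk_items_eq_keys_map (l : List (String × List String)) (hnd : (l.map Prod.fst).Nodup) :
    l = (l.map Prod.fst).map (fun k => (k, (PySem.Dict.mk l).getD k [])) := by
  induction l with
  | nil => rfl
  | cons p t ih =>
      simp only [List.map_cons] at hnd ⊢
      have hnd' := hnd
      rw [List.nodup_cons] at hnd'
      congr 1
      · have hh : (PySem.Dict.mk (p :: t)).getD p.1 [] = p.2 := by
          rw [PySem.Dict.getD_eq_get?_getD, PySem.Dict.get?_mk_cons]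
          simp
        rw [hh]
      · calc t = (t.map Prod.fst).map (fun k => (k, (PySem.Dict.mk t).getD k [])) := ih hnd'.2
          _ = (t.map Prod.fst).map (fun k => (k, (PySem.Dict.mk (p :: t)).getD k [])) := by
              apply List.map_congr_left
              intro k hkmem
              have hk : k ≠ p.1 := fun he => hnd'.1 (he ▸ hkmem)
              have hcons : (PySem.Dict.mk (p :: t)).getD k [] = (PySem.Dict.mk t).getD k [] := by
                rw [PySem.Dict.getD_eq_get?_getD, PySem.Dict.getD_eq_get?_getD, PySem.Dict.get?_mk_cons]
                simp [show (p.1 == k) = false from beq_eq_false_iff_ne.mpr (Ne.symm hk)]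
              rw [hcons]

lemma dict_items_eq_keys_map (d : PySem.Dict String (List String)) (hnd : d.keys.Nodup) :
    d.items = d.keys.map (fun k => (k, d.getD k [])) := by
  have h1 : d = PySem.Dict.mk d.items := by
    apply PySem.Dict.ext; rfl
  have := mk_items_eq_keys_map d.items (by simpa [PySem.Dict.keys] using hnd)
  calc d.items = (d.items.map Prod.fst).map (fun k => (k, (PySem.Dict.mk d.items).getD k [])) := this
    _ = d.keys.map (fun k => (k, d.getD k [])) := by rw [← h1]; rfl

lemma main_eq (skills_data : List (String × List (List (String × String)))) :
    build_package_to_skills_map skills_data = build_package_to_skills_map_alt skills_data := by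
  simp only [build_package_to_skills_map, build_package_to_skills_map_alt]
  set skills := (PySem.Dict.ofList skills_data).getD "skills" [] with hsk
  -- step 1: A's loop is a match-on-pvExtract loop
  have hstep : skills.foldl (fun pm skill =>
      let sk := PySem.Dict.ofList skill
      let name := sk.getD "name" ""
      match sk.get? "library_package" with
      | some lp =>
          if lp ≠ "" then
            let pm := if pm.contains lp then pm else pm.insert lp []
            pm.modify lp [] (fun l => l ++ [name])
          else pm
      | none => pm) PySem.Dict.empty
    = skills.foldl (fun pm skill =>
        match pvExtract skill with
        | some y => pm.modify y.1 [] (fun l => l ++ [y.2])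
        | none => pm) PySem.Dict.empty := by
    apply PySem.List.foldl_congr_mem
    intro pm skill _
    simp only [pvExtract]
    cases h : (PySem.Dict.ofList skill).get? "library_package" with
    | none => simp
    | some lp =>
        by_cases he : lp = ""
        · simp [he]
        · simp only [ne_eq, he, not_false_eq_true, if_true]
          exact insert_modify_eq_modify pm lp _
  have hfun : (fun s : List (String × String) =>
      match (PySem.Dict.ofList s).get? "library_package" with
      | some p => if p ≠ "" then some (p, (PySem.Dict.ofList s).getD "name" "") else none
      | none => none) = pvExtract := by
    funext s; simp only [pvExtract]
  rw [hstep, hfun, foldl_pvExtract]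
  set pairs := skills.filterMap pvExtract with hp
  set D := pairs.foldl (fun pm y => pm.modify y.1 [] (fun l => l ++ [y.2])) PySem.Dict.empty with hD
  have hkeys : D.keys = PySem.Set.ofList (pairs.map Prod.fst) := by
    rw [hD]
    rw [PySem.Dict.keys_foldl_modify_key (key := Prod.fst)
        (f := fun _ p => (fun l => l ++ [p.2])) (d0 := []) (d := PySem.Dict.empty) (l := pairs)]
    simp [PySem.Set.update, PySem.Dict.keys_empty, PySem.Set.ofList_eq_foldl]
  have hnodup : D.keys.Nodup := by
    rw [hkeys]; exact PySem.Set.nodup_ofList _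
  have hget : ∀ c, D.getD c [] = (pairs.filter (fun q => q.1 == c)).map (·.2) := by
    intro c
    rw [hD, PySem.Dict.getD_foldl_modify_append]
    simp
  rw [dict_items_eq_keys_map D hnodup, hkeys]
  simp only [PySem.List.dedup_eq_ofList]
  apply List.map_congr_left
  intro k _
  rw [hget k]

-- ===== VERDICT (by name: the statement is the Claim_ definition above) =====
theorem build_package_to_skills_map_spec : Claim_equal_build_package_to_skills_map := by
  intro sd _ _
  unfold Spec_build_package_to_skills_map
  exact main_eq sd
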